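-- pv_equiv track=rewrite | github.com/go2telegram/five_keys_mirror | growth/bonuses.py | _eligible_level
-- ===== SOURCE A (Python) =====
-- from typing import Dict, List, Mapping, Optional, Tuple
--
-- LEVELS: List[Tuple[str, int]] = [
--     ("Seed", 0),
--     ("Sprout", 50),
--     ("Bud", 150),
--     ("Bloom", 350),
--     ("Forest", 700),
-- ]
--
-- def _eligible_level(points: int) -> str:
--     current = LEVELS[0][0]
--     for name, threshold in LEVELS:
--         if points >= threshold:
--             current = name
--         else:
--             break
--     return current
-- ===== SOURCE B (Python) =====
-- from typing import Dict, List, Mapping, Optional, Tuple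
--
-- LEVELS: List[Tuple[str, int]] = [
--     ("Seed", 0),
--     ("Sprout", 50),
--     ("Bud", 150),
--     ("Bloom", 350),
--     ("Forest", 700),
-- ]
--
-- def _eligible_level(points: int) -> str:
--     # binary search (bisect_right by hand) into the sorted threshold table
--     thresholds = [t for _, t in LEVELS]
--     lo, hi = 0, len(thresholds)
--     while lo < hi:
--         mid = (lo + hi) // 2
--         if points < thresholds[mid]:
--             hi = mid
--         else:
--             lo = mid + 1
--     idx = lo - 1
--     if idx < 0:
--         idx = 0
--     return LEVELS[idx][0]
-- ===== Notes on version B (the rewrite author's own statement) =====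
-- stated objective: alternative
-- what changed: Replaces the forward scan-until-exceeded over LEVELS with a hand-written bisect_right binary search into the sorted threshold list, clamping the -1 index to 0.
import Mathlib
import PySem

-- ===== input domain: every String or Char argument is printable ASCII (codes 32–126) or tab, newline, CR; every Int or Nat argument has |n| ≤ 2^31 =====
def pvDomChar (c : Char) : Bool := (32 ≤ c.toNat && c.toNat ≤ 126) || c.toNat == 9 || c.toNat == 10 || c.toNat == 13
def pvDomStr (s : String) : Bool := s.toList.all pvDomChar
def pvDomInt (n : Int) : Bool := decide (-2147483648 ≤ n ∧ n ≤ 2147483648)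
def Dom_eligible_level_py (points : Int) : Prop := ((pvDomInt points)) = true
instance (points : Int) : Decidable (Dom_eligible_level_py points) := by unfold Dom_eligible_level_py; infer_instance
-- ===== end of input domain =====

-- B replaces A's linear scan-until-exceeded with a bisect_right binary search over the threshold list (alternative algorithm, same results).

-- ===== PORT A =====
def pvLEVELS : List (String × Int) :=
  [("Seed", 0), ("Sprout", 50), ("Bud", 150), ("Bloom", 350), ("Forest", 700)]

-- the for-loop with break: take the last name whose threshold ≤ points, stop at the first that is not
def pvScanA : List (String × Int) → Int → String → String
  | [], _, cur => cur
  | (name, th) :: rest, points, cur =>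
      if points ≥ th then pvScanA rest points name else cur

def eligible_level_py (points : Int) : String :=
  -- current = LEVELS[0][0] (LEVELS is a nonempty literal, so the index is in range)
  pvScanA pvLEVELS points ((PySem.List.pyGet? pvLEVELS 0).getD ("", 0)).1

-- ===== PORT B =====
-- while lo < hi: mid = (lo+hi)//2; if points < thresholds[mid]: hi = mid else lo = mid+1
-- (fuel-based transliteration of the while loop; fuel = initial hi-lo suffices since hi-lo shrinks each step)
def pvBisect (thresholds : List Int) (points : Int) : Nat → Nat → Nat → Nat
  | 0, lo, _ => lo
  | fuel + 1, lo, hi =>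
      if lo < hi then
        let mid := (lo + hi) / 2
        if points < ((PySem.List.pyGet? thresholds (Int.ofNat mid)).getD 0) then
          pvBisect thresholds points fuel lo mid
        else
          pvBisect thresholds points fuel (mid + 1) hi
      else lo

def eligible_level_py_alt (points : Int) : String :=
  let thresholds := pvLEVELS.map Prod.snd
  let lo := pvBisect thresholds points thresholds.length 0 thresholds.length
  let idx : Int := (lo : Int) - 1
  let idx := if idx < 0 then 0 else idx
  ((PySem.List.pyGet? pvLEVELS idx).getD ("", 0)).1

-- ===== PRECONDITION & SPEC =====
def Spec_eligible_level_py (points : Int) (out : String) : Prop := out = eligible_level_py_alt points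
instance (points : Int) (out : String) : Decidable (Spec_eligible_level_py points out) := by unfold Spec_eligible_level_py; infer_instance

-- ===== CLAIM (what is proved, stated in full; the proofs are below) =====
def Claim_equal_eligible_level_py : Prop := ∀ (points : Int), Dom_eligible_level_py points → Spec_eligible_level_py points (eligible_level_py points)

-- ===== LEMMAS AND PROOFS =====

-- ===== VERDICT (by name: the statement is the Claim_ definition above) =====
theorem eligible_level_py_spec : Claim_equal_eligible_level_py := by
  intro points _
  unfold Spec_eligible_level_py eligible_level_py eligible_level_py_alt
  rcases lt_or_ge points 0 with h0 | h0
  · have a : points < 50 := by omega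
    have b : points < 150 := by omega
    simp [pvScanA, pvBisect, pvLEVELS, PySem.List.pyGet?, PySem.List.pyIdx?, h0, a, b, not_le.mpr h0]
  rcases lt_or_ge points 50 with h1 | h1
  · have b : points < 150 := by omega
    simp [pvScanA, pvBisect, pvLEVELS, PySem.List.pyGet?, PySem.List.pyIdx?, h0, h1, b, not_lt.mpr h0, not_le.mpr h1]
  rcases lt_or_ge points 150 with h2 | h2
  · simp [pvScanA, pvBisect, pvLEVELS, PySem.List.pyGet?, PySem.List.pyIdx?, h1, h2, not_lt.mpr h1, not_le.mpr h2,
      show (0:Int) ≤ points by omega]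
  rcases lt_or_ge points 350 with h3 | h3
  · simp [pvScanA, pvBisect, pvLEVELS, PySem.List.pyGet?, PySem.List.pyIdx?, h2, h3, not_lt.mpr h2, not_le.mpr h3,
      show (0:Int) ≤ points by omega, show (50:Int) ≤ points by omega,
      show points < (700:Int) by omega]
  rcases lt_or_ge points 700 with h4 | h4
  · simp [pvScanA, pvBisect, pvLEVELS, PySem.List.pyGet?, PySem.List.pyIdx?, h3, h4, not_lt.mpr h3, not_le.mpr h4,
      show (0:Int) ≤ points by omega, show (50:Int) ≤ points by omega, show (150:Int) ≤ points by omega,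
      show ¬ points < (150:Int) by omega]
  · simp [pvScanA, pvBisect, pvLEVELS, PySem.List.pyGet?, PySem.List.pyIdx?, h4, not_lt.mpr h4,
      show (0:Int) ≤ points by omega, show (50:Int) ≤ points by omega, show (150:Int) ≤ points by omega,
      show (350:Int) ≤ points by omega, show ¬ points < (150:Int) by omega]
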